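-- pv_equiv track=rewrite | github.com/ericlovo/AIIA | local_brain/execution/strategies.py | _parse_changed_files
-- ===== SOURCE A (Python) =====
-- def _parse_changed_files(output: str) -> list[str]:
--     files = []
--     for line in output.splitlines():
--         stripped = line.strip()
--         for prefix in ("Modified ", "Created ", "Edit: ", "Write: "):
--             if stripped.startswith(prefix):
--                 path = stripped[len(prefix) :].strip()
--                 if path:
--                     files.append(path)
--                 break
--     return files
-- ===== SOURCE B (Python) =====
-- def _parse_changed_files(output: str) -> list[str]:
--     keywords = {"Modified", "Created", "Edit:", "Write:"}
--     files = []
--     for line in output.splitlines():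
--         head, sep, rest = line.strip().partition(" ")
--         if sep and head in keywords:
--             path = rest.strip()
--             if path:
--                 files.append(path)
--     return files
-- ===== Notes on version B (the rewrite author's own statement) =====
-- stated objective: idiomatic
-- what changed: Replaced the inner prefix loop with its break by a single str.partition at the first space followed by one membership test of the head in a keyword set.
import Mathlib
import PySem

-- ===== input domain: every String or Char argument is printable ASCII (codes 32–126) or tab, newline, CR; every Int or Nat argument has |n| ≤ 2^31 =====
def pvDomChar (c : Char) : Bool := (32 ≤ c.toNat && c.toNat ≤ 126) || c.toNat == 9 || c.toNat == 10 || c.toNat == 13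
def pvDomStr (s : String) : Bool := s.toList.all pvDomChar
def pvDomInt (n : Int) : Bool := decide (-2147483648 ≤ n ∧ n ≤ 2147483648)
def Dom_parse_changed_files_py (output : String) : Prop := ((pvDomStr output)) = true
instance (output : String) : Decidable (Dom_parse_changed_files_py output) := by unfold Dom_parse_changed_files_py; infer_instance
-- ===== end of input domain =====

-- B replaces A's inner prefix-scan loop (with break) by one partition of each stripped line
-- at its first space plus a single keyword-set membership test (objective: idiomatic, same cost).

-- ===== PORT A =====
-- the tuple of prefixes A scans, in order
def pvPrefixesA : List (List Char) :=
  ["Modified ".toList, "Created ".toList, "Edit: ".toList, "Write: ".toList]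

-- the inner "for prefix in (…): if stripped.startswith(prefix): …; break" loop
def pvInnerA (stripped : List Char) (files : List String) : List (List Char) → List String
  | [] => files
  | p :: ps =>
    if PySem.Chars.startswith stripped p then
      let path := PySem.Chars.strip (PySem.List.slice stripped (some (p.length : Int)) none)
      if path ≠ [] then files ++ [String.ofList path] else files
    else pvInnerA stripped files ps

def parse_changed_files_py (output : String) : List String :=
  (PySem.Chars.splitlines output.toList).foldl
    (fun files line => pvInnerA (PySem.Chars.strip line) files pvPrefixesA) []

-- ===== PORT B =====
def pvKeywordsB : List (List Char) :=
  ["Modified".toList, "Created".toList, "Edit:".toList, "Write:".toList]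

-- hand port of str.partition(" ") (PySem has no partition); exact: the text before the
-- first ' ', a Bool saying whether a separator was found, and the text after it
def pvPartitionSpace (s : List Char) : List Char × Bool × List Char :=
  if (s.takeWhile (· ≠ ' ')).length = s.length then (s.takeWhile (· ≠ ' '), false, [])
  else (s.takeWhile (· ≠ ' '), true, s.drop ((s.takeWhile (· ≠ ' ')).length + 1))

-- B's loop body: head, sep, rest = line.strip().partition(" "); append rest.strip() on a keyword hit
def pvStepB (files : List String) (line : List Char) : List String :=
  let t := pvPartitionSpace (PySem.Chars.strip line)
  if t.2.1 && pvKeywordsB.contains t.1 then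
    let path := PySem.Chars.strip t.2.2
    if path ≠ [] then files ++ [String.ofList path] else files
  else files

def parse_changed_files_py_alt (output : String) : List String :=
  (PySem.Chars.splitlines output.toList).foldl pvStepB []

-- ===== PRECONDITION & SPEC =====
def Spec_parse_changed_files_py (output : String) (out : List String) : Prop := out = parse_changed_files_py_alt output
instance (output : String) (out : List String) : Decidable (Spec_parse_changed_files_py output out) := by unfold Spec_parse_changed_files_py; infer_instance

-- ===== CLAIM (what is proved, stated in full; the proofs are below) =====
def Claim_equal_parse_changed_files_py : Prop := ∀ (output : String), Dom_parse_changed_files_py output → Spec_parse_changed_files_py output (parse_changed_files_py output)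

-- ===== LEMMAS AND PROOFS =====

-- takeWhile (· ≠ ' ') reads exactly a space-free prefix up to the first space
theorem pv_tw_append (kw : List Char) (hkw : ' ' ∉ kw) (t : List Char) :
    (kw ++ ' ' :: t).takeWhile (· ≠ ' ') = kw := by
  induction kw with
  | nil => simp
  | cons c kw ih =>
    have hc : c ≠ ' ' := fun h => hkw (by simp [h])
    have hkw' : ' ' ∉ kw := fun h => hkw (List.mem_cons_of_mem _ h)
    rw [List.cons_append, List.takeWhile_cons, if_pos (by simpa using hc), ih hkw']

-- when a space exists, s decomposes as head ++ ' ' :: rest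
theorem pv_span (s : List Char) (h : (s.takeWhile (· ≠ ' ')).length ≠ s.length) :
    s = s.takeWhile (· ≠ ' ') ++ ' ' :: s.drop ((s.takeWhile (· ≠ ' ')).length + 1) := by
  induction s with
  | nil => simp at h
  | cons c s ih =>
    by_cases hc : c = ' '
    · subst hc; simp
    · have htw : (c :: s).takeWhile (· ≠ ' ') = c :: s.takeWhile (· ≠ ' ') := by
        simp [hc]
      rw [htw] at h ⊢
      simp only [List.length_cons, List.cons_append, List.drop_succ_cons]
      have h' : (s.takeWhile (· ≠ ' ')).length ≠ s.length := by
        simp only [List.length_cons] at h; omega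
      exact congrArg (c :: ·) (ih h')

-- A's startswith (kw ++ " ") test ↔ B's partition yields exactly kw with a separator
theorem pv_startswith_iff_partition (s kw : List Char) (hkw : ' ' ∉ kw) :
    PySem.Chars.startswith s (kw ++ [' ']) = true ↔
      (s.takeWhile (· ≠ ' ') = kw ∧ (s.takeWhile (· ≠ ' ')).length ≠ s.length) := by
  rw [PySem.Chars.startswith_iff]
  constructor
  · rintro ⟨t, ht⟩
    have hs' : s = kw ++ ' ' :: t := by rw [← ht]; simp
    subst hs'
    rw [pv_tw_append kw hkw t]
    refine ⟨rfl, ?_⟩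
    simp only [List.length_append, List.length_cons]
    omega
  · rintro ⟨hhead, hne⟩
    exact ⟨_, by rw [List.append_assoc, List.singleton_append, ← hhead]; exact (pv_span s hne).symm⟩

-- the full value of the partition on a matched line
theorem pv_part_of_startswith (s kw : List Char) (hkw : ' ' ∉ kw)
    (h : PySem.Chars.startswith s (kw ++ [' ']) = true) :
    pvPartitionSpace s = (kw, true, s.drop (kw.length + 1)) := by
  obtain ⟨hhead, hne⟩ := (pv_startswith_iff_partition s kw hkw).mp h
  unfold pvPartitionSpace
  rw [if_neg hne, hhead]

theorem pv_stepB_match (files : List String) (line kw : List Char) (hkw : ' ' ∉ kw)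
    (hcont : pvKeywordsB.contains kw = true)
    (h : PySem.Chars.startswith (PySem.Chars.strip line) (kw ++ [' ']) = true) :
    pvStepB files line =
      if PySem.Chars.strip ((PySem.Chars.strip line).drop (kw.length + 1)) ≠ [] then
        files ++ [String.ofList (PySem.Chars.strip ((PySem.Chars.strip line).drop (kw.length + 1)))]
      else files := by
  unfold pvStepB
  rw [pv_part_of_startswith _ _ hkw h]
  simp only [hcont, Bool.and_self, if_true]

theorem pv_stepB_nomatch (files : List String) (line : List Char)
    (h : ∀ kw ∈ pvKeywordsB, ¬ PySem.Chars.startswith (PySem.Chars.strip line) (kw ++ [' ']) = true) :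
    pvStepB files line = files := by
  simp only [pvStepB]
  rcases hb : ((pvPartitionSpace (PySem.Chars.strip line)).2.1
      && pvKeywordsB.contains (pvPartitionSpace (PySem.Chars.strip line)).1) with _ | _
  · simp
  · exfalso
    obtain ⟨hsep, hcont⟩ := Bool.and_eq_true_iff.mp hb
    have hmem := List.contains_iff_mem.mp hcont
    set s := PySem.Chars.strip line with hs
    have hfst : (pvPartitionSpace s).1 = s.takeWhile (· ≠ ' ') := by
      unfold pvPartitionSpace; split <;> rfl
    have hsep' : (s.takeWhile (· ≠ ' ')).length ≠ s.length := by
      by_contra hl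
      unfold pvPartitionSpace at hsep
      rw [if_pos hl] at hsep
      simp at hsep
    rw [hfst] at hmem
    have hkw : ' ' ∉ s.takeWhile (· ≠ ' ') := by
      intro hmem'
      have := List.mem_takeWhile_imp hmem'
      simp at this
    exact h _ hmem ((pv_startswith_iff_partition s _ hkw).mpr ⟨rfl, hsep'⟩)

theorem pv_innerA_nil (stripped : List Char) (files : List String) :
    pvInnerA stripped files [] = files := rfl

theorem pv_innerA_cons (stripped : List Char) (files : List String) (p : List Char) (ps : List (List Char)) :
    pvInnerA stripped files (p :: ps) =
      if PySem.Chars.startswith stripped p = true then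
        (if PySem.Chars.strip (PySem.List.slice stripped (some (p.length : Int)) none) ≠ [] then
          files ++ [String.ofList (PySem.Chars.strip (PySem.List.slice stripped (some (p.length : Int)) none))]
        else files)
      else pvInnerA stripped files ps := rfl

-- the per-line bodies of A and B agree
theorem pv_step_eq (files : List String) (line : List Char) :
    pvInnerA (PySem.Chars.strip line) files pvPrefixesA = pvStepB files line := by
  have e1 : "Modified ".toList = "Modified".toList ++ [' '] := by decide
  have e2 : "Created ".toList = "Created".toList ++ [' '] := by decide
  have e3 : "Edit: ".toList = "Edit:".toList ++ [' '] := by decide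
  have e4 : "Write: ".toList = "Write:".toList ++ [' '] := by decide
  have key : ∀ (p kw : List Char), p = kw ++ [' '] → ' ' ∉ kw → pvKeywordsB.contains kw = true →
      PySem.Chars.startswith (PySem.Chars.strip line) p = true →
      (if PySem.Chars.strip (PySem.List.slice (PySem.Chars.strip line) (some (p.length : Int)) none) ≠ [] then
        files ++ [String.ofList (PySem.Chars.strip (PySem.List.slice (PySem.Chars.strip line) (some (p.length : Int)) none))]
      else files) = pvStepB files line := by
    intro p kw hp hkw hcont h
    subst hp
    rw [pv_stepB_match files line kw hkw hcont h]
    have hl : (((kw ++ [' ']).length : Nat) : Int) = ((kw.length + 1 : Nat) : Int) := by simp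
    rw [hl, PySem.List.slice_from_natCast]
  rw [pvPrefixesA]
  by_cases h1 : PySem.Chars.startswith (PySem.Chars.strip line) "Modified ".toList = true
  · rw [pv_innerA_cons, if_pos h1]
    exact key _ _ e1 (by decide) (by decide) h1
  · rw [pv_innerA_cons, if_neg h1]
    by_cases h2 : PySem.Chars.startswith (PySem.Chars.strip line) "Created ".toList = true
    · rw [pv_innerA_cons, if_pos h2]
      exact key _ _ e2 (by decide) (by decide) h2
    · rw [pv_innerA_cons, if_neg h2]
      by_cases h3 : PySem.Chars.startswith (PySem.Chars.strip line) "Edit: ".toList = true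
      · rw [pv_innerA_cons, if_pos h3]
        exact key _ _ e3 (by decide) (by decide) h3
      · rw [pv_innerA_cons, if_neg h3]
        by_cases h4 : PySem.Chars.startswith (PySem.Chars.strip line) "Write: ".toList = true
        · rw [pv_innerA_cons, if_pos h4]
          exact key _ _ e4 (by decide) (by decide) h4
        · rw [pv_innerA_cons, if_neg h4, pv_innerA_nil]
          refine (pv_stepB_nomatch files line ?_).symm
          intro kw hmem
          simp only [pvKeywordsB, List.mem_cons, List.not_mem_nil, or_false] at hmem
          rcases hmem with rfl | rfl | rfl | rfl
          · rw [← e1]; exact h1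
          · rw [← e2]; exact h2
          · rw [← e3]; exact h3
          · rw [← e4]; exact h4

-- ===== VERDICT (by name: the statement is the Claim_ definition above) =====
theorem parse_changed_files_py_spec : Claim_equal_parse_changed_files_py := by
  intro output _
  unfold Spec_parse_changed_files_py parse_changed_files_py parse_changed_files_py_alt
  have hstep : (fun files line => pvInnerA (PySem.Chars.strip line) files pvPrefixesA) = pvStepB :=
    funext fun files => funext fun line => pv_step_eq files line
  rw [hstep]
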